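-- pv_equiv track=rewrite | github.com/cecilia-uu/LeetCode | OA/115.py | numAfterInsertion
-- ===== SOURCE A (Python) =====
-- def numAfterInsertion(s, t):
--     x, y = t[0], t[1]
--     ans = cnt_x = cnt_y = 0
--     for c in t:
--         if c == y:
--             ans += cnt_x
--             cnt_y += 1
--         if c == x:
--             cnt_x += 1
--     return ans + max(cnt_x, cnt_y)
-- ===== SOURCE B (Python) =====
-- def numAfterInsertion(s, t):
--     # for each occurrence of y, recount the x's in the prefix slice before it
--     x, y = t[0], t[1]
--     ans = sum(t[:j].count(x) for j, c in enumerate(t) if c == y)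
--     return ans + max(t.count(x), t.count(y))
-- ===== Notes on version B (the rewrite author's own statement) =====
-- stated objective: simpler
-- what changed: B drops A's single-pass running counters (ans/cnt_x/cnt_y) and instead, for each occurrence of y=t[1], recounts x=t[0] in the prefix slice t[:j] via enumerate + str.count, adding max(t.count(x), t.count(y)) from whole-string counts: nested recounting passes over slices instead of one streaming accumulator pass.
import Mathlib
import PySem

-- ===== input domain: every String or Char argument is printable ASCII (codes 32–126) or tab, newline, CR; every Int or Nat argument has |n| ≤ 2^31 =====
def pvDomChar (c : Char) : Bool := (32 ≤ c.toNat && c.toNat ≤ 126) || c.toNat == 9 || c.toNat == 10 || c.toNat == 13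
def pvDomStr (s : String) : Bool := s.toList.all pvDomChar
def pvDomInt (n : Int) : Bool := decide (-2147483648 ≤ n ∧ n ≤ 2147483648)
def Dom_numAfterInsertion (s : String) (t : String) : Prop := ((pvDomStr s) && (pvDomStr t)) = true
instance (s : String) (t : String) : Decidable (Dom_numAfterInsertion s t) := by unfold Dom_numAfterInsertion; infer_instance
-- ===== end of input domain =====

-- B replaces A's single streaming pass with running counters by per-occurrence recounting:
-- for each y at index j it recounts x in the prefix slice t[:j]; an alternative decomposition
-- (no running counters), simpler to read, quadratic instead of linear.
-- The parameter s is unused by both programs (as in the Python).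

-- ===== PORT A =====
-- loop state: (ans, cnt_x, cnt_y); cnt_x is read before it is (possibly) incremented, as in A
def pvStepA (x y : Char) (st : Int × Int × Int) (c : Char) : Int × Int × Int :=
  (if c == y then st.1 + st.2.1 else st.1,
   if c == x then st.2.1 + 1 else st.2.1,
   if c == y then st.2.2 + 1 else st.2.2)

def numAfterInsertion (s : String) (t : String) : Int :=
  match PySem.Str.pyGet? t 0, PySem.Str.pyGet? t 1 with
  | some x, some y =>
    let st := t.toList.foldl (pvStepA x y) (0, 0, 0)
    st.1 + max st.2.1 st.2.2
  | _, _ => 0   -- unreachable under Pre_: Python raises IndexError when len(t) < 2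

-- ===== PORT B =====
-- sum(t[:j].count(x) for j, c in enumerate(t) if c == y); str.count of a 1-char needle is ported
-- as List.count of that Char (exact), the slice t[:j] as PySem.List.slice.
def numAfterInsertion_alt (s : String) (t : String) : Int :=
  match PySem.Str.pyGet? t 0 with
  | none => 0   -- unreachable under Pre_: Python raises IndexError when len(t) < 2
  | some x =>
    match PySem.Str.pyGet? t 1 with
    | none => 0   -- unreachable under Pre_
    | some y =>
      let tl := t.toList
      let ans := (PySem.List.enumerate tl 0).foldl
        (fun acc jc => if jc.2 == y then acc + ((PySem.List.slice tl none (some jc.1)).count x : Int) else acc) 0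
      ans + max (tl.count x : Int) (tl.count y : Int)

-- ===== PRECONDITION & SPEC =====
-- Pre_ excludes exactly the inputs on which the Python A raises IndexError (t[1] with len(t) < 2).
def Pre_numAfterInsertion (s : String) (t : String) : Prop := 2 ≤ t.toList.length
instance (s : String) (t : String) : Decidable (Pre_numAfterInsertion s t) := by unfold Pre_numAfterInsertion; infer_instance
def pvWitness_numAfterInsertion : String × String := ("", "abba")

def Spec_numAfterInsertion (s : String) (t : String) (out : Int) : Prop := out = numAfterInsertion_alt s t
instance (s : String) (t : String) (out : Int) : Decidable (Spec_numAfterInsertion s t out) := by unfold Spec_numAfterInsertion; infer_instance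

-- ===== CLAIM =====
def Claim_equal_numAfterInsertion : Prop := ∀ (s : String) (t : String), Dom_numAfterInsertion s t → Pre_numAfterInsertion s t → Spec_numAfterInsertion s t (numAfterInsertion s t)

-- ===== LEMMAS AND PROOFS =====

-- A's fold, started with cnt_x = count of x in the already-processed prefix, equals
-- B's enumerate-fold over the remaining suffix (indices starting at the prefix length),
-- together with the final counter values.
theorem foldA_enum (x y : Char) (tl : List Char) :
    ∀ (suf pre : List Char), tl = pre ++ suf → ∀ (a cy b : Int),
      List.foldl (pvStepA x y) (a, (pre.count x : Int), cy) suf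
        = (a + ((PySem.List.enumerate suf ((pre.length : Int))).foldl
              (fun acc jc => if jc.2 == y then acc + ((PySem.List.slice tl none (some jc.1)).count x : Int) else acc) b) - b,
           (pre.count x : Int) + suf.count x,
           cy + suf.count y) := by
  intro suf
  induction suf with
  | nil =>
    intro pre _ a cy b
    simp [PySem.List.enumerate]
  | cons c suf ih =>
    intro pre htl a cy b
    rw [PySem.List.enumerate_cons, List.foldl_cons, List.foldl_cons]
    have hslice : PySem.List.slice tl none (some ((pre.length : Int))) = pre := by
      rw [PySem.List.slice_to_natCast, htl, List.take_left]
    have hpre' : tl = (pre ++ [c]) ++ suf := by rw [htl, List.append_assoc]; rfl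
    have hcx : ((pre ++ [c]).count x : Int) = (if c == x then (pre.count x : Int) + 1 else (pre.count x : Int)) := by
      by_cases h : (c == x) = true <;> simp [List.count_append, List.count_cons, h]
    have hlen : ((pre.length : Int)) + 1 = (((pre ++ [c]).length : Int)) := by
      simp
    have ihh := ih (pre ++ [c]) hpre'
      (if c == y then a + (pre.count x : Int) else a)
      (if c == y then cy + 1 else cy)
      (if c == y then b + ((PySem.List.slice tl none (some ((pre.length : Int)))).count x : Int) else b)
    rw [hslice] at ihh
    simp only [pvStepA]
    rw [hslice, ← hcx, hlen]
    rw [ihh]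
    by_cases hy : (c == y) = true <;> by_cases hx : (c == x) = true <;>
      simp [hy, hx, List.count_cons, List.count_append, Prod.ext_iff] <;>
    first
      | (refine ⟨?_, ?_, ?_⟩ <;> (push_cast; ring))
      | (refine ⟨?_, ?_⟩ <;> (push_cast; ring))
      | (push_cast; ring)
      | trivial

-- ===== VERDICT =====
theorem numAfterInsertion_spec : Claim_equal_numAfterInsertion := by
  intro s t _ _
  unfold Spec_numAfterInsertion numAfterInsertion numAfterInsertion_alt
  cases h0 : PySem.Str.pyGet? t 0 with
  | none => cases PySem.Str.pyGet? t 1 <;> rfl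
  | some x =>
    cases h1 : PySem.Str.pyGet? t 1 with
    | none => rfl
    | some y =>
      have h := foldA_enum x y t.toList t.toList [] rfl 0 0 0
      simp only [List.count_nil, Nat.cast_zero, List.length_nil] at h
      simp only [h]
      ring_nf
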